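-- pv_equiv track=rewrite | github.com/Namhunk/OJ | 프로그래머스/5/81305. 시험장 나누기/시험장 나누기.py | solution
-- ===== SOURCE A (Python) =====
-- def solution(k, num, links):
--     N = len(num)
--     find_root = {i for i in range(N)}
--     for i in range(N):
--         for child in links[i]:
--             if child != -1:
--                 find_root.discard(child)
--
--     root = find_root.pop()
--
--     # 1. 후위 순회 결과를 담을 배열 (solution 내부 지역 변수로)
--     arr = []
--
--     # 내부 함수로 만들어서 arr, links에 쉽게 접근하도록 함
--     def postorder(x):
--         left, right = links[x]
--         if left >= 0:
--             postorder(left)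
--         if right >= 0:
--             postorder(right)
--         arr.append(x)
--
--     postorder(root)
--
--     # 2. 이분 탐색용 판별 함수
--     def group_cnt(limit):
--         sum_dp = [0]*N
--         cnt_dp = [0]*N
--
--         for x in arr: # 무조건 후위 순회 순서대로 안전하게 접근
--             left, right = links[x]
--             a = num[x]
--
--             # 자식이 없는 리프
--             if left < 0 and right < 0:
--                 sum_dp[x] = a
--                 cnt_dp[x] = 0
--                 continue
--
--             # 자식이 1명
--             if (left >= 0) ^ (right >= 0):
--                 child = left if left >= 0 else right
--                 s, c = sum_dp[child], cnt_dp[child]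
--
--                 if s + a <= limit:
--                     sum_dp[x] = s + a
--                     cnt_dp[x] = c
--                 else:
--                     sum_dp[x] = a
--                     cnt_dp[x] = c + 1
--                 continue
--
--             # 자식이 2명
--             if left >= 0 and right >= 0:
--                 s1, c1 = sum_dp[left], cnt_dp[left]
--                 s2, c2 = sum_dp[right], cnt_dp[right]
--
--                 # 셋 다 합칠 수 있는지
--                 if s1 + s2 + a <= limit:
--                     sum_dp[x] = s1 + s2 + a
--                     cnt_dp[x] = c1 + c2
--                 else:
--                     # 셋은 안 되고 둘씩 묶을 수 있는지 확인
--                     temp = []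
--                     if s1 + a <= limit:
--                         temp.append((s1 + a, s2, c1, c2))
--                     if s2 + a <= limit:
--                         temp.append((s2 + a, s1, c2, c1))
--
--                     if temp:
--                         temp.sort(key=lambda item: item[0])
--                         new_sum, other_sum, c_main, c_other = temp[0]
--                         sum_dp[x] = new_sum
--                         # ★ 여기서 잘려나간 other_sum에 대한 그룹 수 +1 을 꼭 해줘야 함
--                         cnt_dp[x] = c_main + c_other + 1
--                     else:
--                         # 어느 쪽과도 합칠 수 없으면 두 자식 그룹 다 끊어내고 나 홀로 새 그룹
--                         sum_dp[x] = a
--                         cnt_dp[x] = c1 + c2 + 2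
--
--         return cnt_dp[root] + 1
--
--     # 3. 이분 탐색
--     l, r = max(num), sum(num)
--     answer = r
--
--     while l <= r:
--         m = (l + r) // 2
--         if group_cnt(m) <= k:
--             answer = m
--             r = m - 1
--         else:
--             l = m + 1
--
--     return answer
-- ===== SOURCE B (Python) =====
-- def solution(k, num, links):
--     N = len(num)
--     has_parent = [False] * N
--     for row in links[:N]:
--         for c in row:
--             if c >= 0:
--                 has_parent[c] = True
--     root = has_parent.index(False)
--
--     def feasible(limit):
--         def dfs(x):
--             left, right = links[x]
--             a = num[x]
--             if left < 0 and right < 0: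
--                 return a, 0
--             if left < 0 or right < 0:
--                 s, c = dfs(left if left >= 0 else right)
--                 if s + a <= limit:
--                     return s + a, c
--                 return a, c + 1
--             s1, c1 = dfs(left)
--             s2, c2 = dfs(right)
--             if s1 + s2 + a <= limit:
--                 return s1 + s2 + a, c1 + c2
--             best = None
--             if s1 + a <= limit:
--                 best = (s1 + a, c1 + c2 + 1)
--             if s2 + a <= limit and (best is None or s2 + a < best[0]):
--                 best = (s2 + a, c1 + c2 + 1)
--             if best is not None:
--                 return best
--             return a, c1 + c2 + 2
--
--         return dfs(root)[1] + 1
--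
--     l, r = max(num), sum(num)
--     answer = r
--     while l <= r:
--         m = (l + r) // 2
--         if feasible(m) <= k:
--             answer = m
--             r = m - 1
--         else:
--             l = m + 1
--     return answer
-- ===== Notes on version B (the rewrite author's own statement) =====
-- stated objective: simpler
-- what changed: The explicit postorder buffer plus the iterative sum_dp/cnt_dp array DP inside group_cnt are replaced by a single recursive feasibility DFS that returns (group sum, cut count) pairs directly, and the set-based root search by a has_parent flag array; root choice and the outer binary search are kept.
-- outside the precondition, e.g. on solution(1, [3, 4], [[1, 1], [-1, -1]]): A returns 7, B returns 7; on solution(1, [3, 4, 5], [[1, -1], [-1, -1], [-1, -1, 2]]): A returns 7, B returns 7; on solution(1, [3, 4], [[-1, -1], [5, -1]]): A returns 4, B raises IndexError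
import Mathlib
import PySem

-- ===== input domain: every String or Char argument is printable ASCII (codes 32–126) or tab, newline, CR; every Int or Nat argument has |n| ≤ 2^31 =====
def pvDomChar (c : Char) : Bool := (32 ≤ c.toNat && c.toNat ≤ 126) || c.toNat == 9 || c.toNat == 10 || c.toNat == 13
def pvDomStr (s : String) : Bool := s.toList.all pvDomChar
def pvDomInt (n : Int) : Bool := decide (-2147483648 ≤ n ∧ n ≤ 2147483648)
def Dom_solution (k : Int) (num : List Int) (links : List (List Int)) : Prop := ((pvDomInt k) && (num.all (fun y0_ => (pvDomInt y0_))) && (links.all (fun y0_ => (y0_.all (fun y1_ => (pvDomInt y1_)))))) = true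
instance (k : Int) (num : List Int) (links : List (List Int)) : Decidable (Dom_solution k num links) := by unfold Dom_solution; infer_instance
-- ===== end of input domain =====

-- B replaces A's explicit postorder buffer + array DP loop by a direct recursive
-- feasibility DFS returning (group sum, cut count) pairs (objective: simpler/alternative).

-- ===== PORT A =====

-- postorder(x): builds the postorder buffer `arr`; fuel bounds the recursion depth
-- (Pre_ guarantees the part reachable from the root is a tree of depth ≤ len(num),
-- so fuel = len(num) is never exhausted on admitted inputs).
def postA (links : List (List Int)) : Nat → Int → List Int → List Int
  | 0, _, arr => arr
  | f + 1, x, arr =>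
    let row := PySem.List.pyGetD links x []
    let left := PySem.List.pyGetD row 0 0
    let right := PySem.List.pyGetD row 1 0
    let arr1 := if 0 ≤ left then postA links f left arr else arr
    let arr2 := if 0 ≤ right then postA links f right arr1 else arr1
    arr2 ++ [x]

-- the body of `for x in arr:` inside group_cnt, acting on the pair (sum_dp, cnt_dp)
def stepA (num : List Int) (links : List (List Int)) (limit : Int)
    (st : List Int × List Int) (x : Int) : List Int × List Int :=
  let sd := st.1
  let cd := st.2
  let row := PySem.List.pyGetD links x []
  let left := PySem.List.pyGetD row 0 0
  let right := PySem.List.pyGetD row 1 0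
  let a := PySem.List.pyGetD num x 0
  if left < 0 ∧ right < 0 then
    (PySem.List.pySetD sd x a, PySem.List.pySetD cd x 0)
  else if xor (decide (0 ≤ left)) (decide (0 ≤ right)) then
    let child := if 0 ≤ left then left else right
    let s := PySem.List.pyGetD sd child 0
    let c := PySem.List.pyGetD cd child 0
    if s + a ≤ limit then
      (PySem.List.pySetD sd x (s + a), PySem.List.pySetD cd x c)
    else
      (PySem.List.pySetD sd x a, PySem.List.pySetD cd x (c + 1))
  else if 0 ≤ left ∧ 0 ≤ right then
    let s1 := PySem.List.pyGetD sd left 0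
    let c1 := PySem.List.pyGetD cd left 0
    let s2 := PySem.List.pyGetD sd right 0
    let c2 := PySem.List.pyGetD cd right 0
    if s1 + s2 + a ≤ limit then
      (PySem.List.pySetD sd x (s1 + s2 + a), PySem.List.pySetD cd x (c1 + c2))
    else
      let temp : List (Int × Int × Int × Int) :=
        (if s1 + a ≤ limit then [(s1 + a, s2, c1, c2)] else []) ++
        (if s2 + a ≤ limit then [(s2 + a, s1, c2, c1)] else [])
      if temp ≠ [] then
        let tsorted := PySem.List.sorted temp (fun t => t.1) false
        let t0 := tsorted.headD (0, 0, 0, 0)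
        (PySem.List.pySetD sd x t0.1, PySem.List.pySetD cd x (t0.2.2.1 + t0.2.2.2 + 1))
      else
        (PySem.List.pySetD sd x a, PySem.List.pySetD cd x (c1 + c2 + 2))
  else st

-- group_cnt(limit)
def groupCntA (num : List Int) (links : List (List Int)) (root : Int) (arr : List Int)
    (limit : Int) : Int :=
  let st := arr.foldl (stepA num links limit)
    (List.replicate num.length 0, List.replicate num.length 0)
  PySem.List.pyGetD st.2 root 0 + 1

-- the `while l <= r:` binary search
def bsearchA (num : List Int) (links : List (List Int)) (root : Int) (arr : List Int)
    (k l r answer : Int) : Int :=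
  if h : l ≤ r then
    let m := PySem.Int.floordiv (l + r) 2
    if groupCntA num links root arr m ≤ k then
      bsearchA num links root arr k l (m - 1) m
    else
      bsearchA num links root arr k (m + 1) r answer
  else answer
termination_by (r - l + 1).toNat
decreasing_by
  · have hm := PySem.Int.floordiv_two_mid_bounds h
    omega
  · have hm := PySem.Int.floordiv_two_mid_bounds h
    omega

def solution (k : Int) (num : List Int) (links : List (List Int)) : Int :=
  let N := num.length
  let fr0 : PySem.Set Int := PySem.Set.ofList (PySem.List.pyRange 0 (N : Int) 1)
  let fr := (PySem.List.pyRange 0 (N : Int) 1).foldl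
    (fun s i => (PySem.List.pyGetD links i []).foldl
      (fun s c => if c ≠ -1 then PySem.Set.discard s c else s) s) fr0
  -- find_root.pop(): on a set of ints drawn from range(N), CPython's pop returns the
  -- smallest remaining element, which is the head of this insertion-ordered set
  let root := fr.headD 0
  let arr := postA links N root []
  let l := (PySem.List.max? num (fun y => y)).getD 0
  let r := num.sum
  bsearchA num links root arr k l r r

-- ===== PORT B =====

-- dfs(x) of feasible(limit): returns (sum_dp, cnt_dp) for the subtree of x;
-- fuel bounds the depth exactly as in port A
def dfsB (num : List Int) (links : List (List Int)) (limit : Int) : Nat → Int → Int × Int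
  | 0, _ => (0, 0)
  | f + 1, x =>
    let row := PySem.List.pyGetD links x []
    let left := PySem.List.pyGetD row 0 0
    let right := PySem.List.pyGetD row 1 0
    let a := PySem.List.pyGetD num x 0
    if left < 0 ∧ right < 0 then (a, 0)
    else if left < 0 ∨ right < 0 then
      let sc := dfsB num links limit f (if 0 ≤ left then left else right)
      if sc.1 + a ≤ limit then (sc.1 + a, sc.2) else (a, sc.2 + 1)
    else
      let p1 := dfsB num links limit f left
      let p2 := dfsB num links limit f right
      if p1.1 + p2.1 + a ≤ limit then (p1.1 + p2.1 + a, p1.2 + p2.2)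
      else
        let best0 : Option (Int × Int) :=
          if p1.1 + a ≤ limit then some (p1.1 + a, p1.2 + p2.2 + 1) else none
        let best : Option (Int × Int) :=
          match best0 with
          | none => if p2.1 + a ≤ limit then some (p2.1 + a, p1.2 + p2.2 + 1) else none
          | some b => if p2.1 + a ≤ limit ∧ p2.1 + a < b.1 then some (p2.1 + a, p1.2 + p2.2 + 1) else some b
        match best with
        | some b => b
        | none => (a, p1.2 + p2.2 + 2)

-- feasible(limit) = dfs(root)[1] + 1
def feasB (num : List Int) (links : List (List Int)) (root limit : Int) : Int :=
  (dfsB num links limit num.length root).2 + 1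

def bsearchB (num : List Int) (links : List (List Int)) (root k l r answer : Int) : Int :=
  if h : l ≤ r then
    let m := PySem.Int.floordiv (l + r) 2
    if feasB num links root m ≤ k then
      bsearchB num links root k l (m - 1) m
    else
      bsearchB num links root k (m + 1) r answer
  else answer
termination_by (r - l + 1).toNat
decreasing_by
  · have hm := PySem.Int.floordiv_two_mid_bounds h
    omega
  · have hm := PySem.Int.floordiv_two_mid_bounds h
    omega

def solution_alt (k : Int) (num : List Int) (links : List (List Int)) : Int :=
  let N := num.length
  -- has_parent array; links[:N] is links.take N (slice with natural bounds)
  let hp := (links.take N).foldl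
    (fun hp row => row.foldl
      (fun hp c => if 0 ≤ c then PySem.List.pySetD hp c true else hp) hp)
    (List.replicate N false)
  let root : Int := ((PySem.List.index? hp false).getD 0 : Nat)
  let l := (PySem.List.max? num (fun y => y)).getD 0
  let r := num.sum
  bsearchB num links root k l r r

-- ===== PRECONDITION & SPEC =====

-- the non-(-1) child entries of the first n rows, in order
def kidsOf (links : List (List Int)) (n : Nat) : List Int :=
  ((links.take n).flatMap (fun r => r)).filter (fun e => decide (0 ≤ e))

-- Pre_ excludes inputs that are not a binary forest shape over 0..len(num)-1 (empty num, too
-- few rows, a first-N row that is not exactly two entries < len(num), a node with two parents,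
-- or no parentless node): there A raises (KeyError/IndexError/unpacking error, or unbounded
-- recursion on a reachable cycle), or — when the malformed part is unreachable from the root —
-- returns by accident of postorder revisiting/ignoring it (B then agrees or raises; see cites).
def Pre_solution (k : Int) (num : List Int) (links : List (List Int)) : Prop :=
  0 < num.length ∧ num.length ≤ links.length ∧
  (∀ r ∈ links.take num.length, r.length = 2 ∧ ∀ e ∈ r, e < (num.length : Int)) ∧
  (kidsOf links num.length).Nodup ∧
  (PySem.List.pyRange 0 (num.length : Int) 1).filter
    (fun y => decide (y ∉ kidsOf links num.length)) ≠ []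

instance (k : Int) (num : List Int) (links : List (List Int)) : Decidable (Pre_solution k num links) := by
  unfold Pre_solution; infer_instance

def pvWitness_solution : Int × List Int × List (List Int) :=
  (2, [1, 2, 3], [[1, 2], [-1, -1], [-1, -1]])

def Spec_solution (k : Int) (num : List Int) (links : List (List Int)) (out : Int) : Prop :=
  out = solution_alt k num links

instance (k : Int) (num : List Int) (links : List (List Int)) (out : Int) : Decidable (Spec_solution k num links out) := by
  unfold Spec_solution; infer_instance

-- ===== CLAIM (what is proved, stated in full; the proofs are below) =====
def Claim_equal_solution : Prop := ∀ (k : Int) (num : List Int) (links : List (List Int)), Dom_solution k num links → Pre_solution k num links → Spec_solution k num links (solution k num links)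

-- ===== LEMMAS AND PROOFS =====


-- proof-only helpers -------------------------------------------------------

def PP (links : List (List Int)) (f : Nat) (x : Int) : List Int := postA links f x []

def leftOf (links : List (List Int)) (x : Int) : Int :=
  PySem.List.pyGetD (PySem.List.pyGetD links x []) 0 0

def rightOf (links : List (List Int)) (x : Int) : Int :=
  PySem.List.pyGetD (PySem.List.pyGetD links x []) 1 0

def childOf (links : List (List Int)) (n : Nat) (c p : Int) : Prop :=
  0 ≤ p ∧ p < (n : Int) ∧ 0 ≤ c ∧ c ∈ PySem.List.pyGetD links p []

-- depth-bounded well-formedness of the subtree below x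
def Deep (n : Nat) (links : List (List Int)) : Nat → Int → Prop
  | 0, _ => False
  | f + 1, x =>
    0 ≤ x ∧ x < (n : Int) ∧
    (0 ≤ leftOf links x → Deep n links f (leftOf links x)) ∧
    (0 ≤ rightOf links x → Deep n links f (rightOf links x))

lemma pyGetD_pair0 (a b : Int) : PySem.List.pyGetD [a, b] 0 0 = a := by
  simp [PySem.List.pyGetD, PySem.List.pyGet?, PySem.List.pyIdx?]

lemma pyGetD_pair1 (a b : Int) : PySem.List.pyGetD [a, b] 1 0 = b := by
  simp [PySem.List.pyGetD, PySem.List.pyGet?, PySem.List.pyIdx?]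

lemma pyGetD_set_self (xs : List Int) (x v : Int) (hx0 : 0 ≤ x) (hxl : x < (xs.length : Int)) :
    PySem.List.pyGetD (PySem.List.pySetD xs x v) x 0 = v := by
  rw [PySem.List.pySetD_of_nonneg xs v hx0]
  have hlt : x.toNat < xs.length := by omega
  rw [PySem.List.pyGetD_eq_getElem _ _ hx0 (by simp; push_cast; omega)]
  simp [List.getElem_set_self, hlt]

lemma pyGetD_set_ne (xs : List Int) (x y v : Int) (hx0 : 0 ≤ x) (hy0 : 0 ≤ y) (hne : y ≠ x) :
    PySem.List.pyGetD (PySem.List.pySetD xs x v) y 0 = PySem.List.pyGetD xs y 0 := by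
  rw [PySem.List.pySetD_of_nonneg xs v hx0]
  have hy : y = ((y.toNat : Nat) : Int) := by omega
  rw [hy, PySem.List.pyGetD_natCast, PySem.List.pyGetD_natCast]
  have hnen : x.toNat ≠ y.toNat := by omega
  simp [List.getD, List.getElem?_set_ne hnen]

lemma postA_acc (links : List (List Int)) :
    ∀ (f : Nat) (x : Int) (arr : List Int), postA links f x arr = arr ++ postA links f x [] := by
  intro f
  induction f with
  | zero => intro x arr; simp [postA]
  | succ f ih =>
    intro x arr
    simp only [postA]
    generalize PySem.List.pyGetD (PySem.List.pyGetD links x []) 0 0 = L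
    generalize PySem.List.pyGetD (PySem.List.pyGetD links x []) 1 0 = R
    by_cases h1 : 0 ≤ L <;> by_cases h2 : 0 ≤ R <;>
      simp only [h1, h2, if_true, if_false]
    · rw [ih L arr, ih R (arr ++ postA links f L []), ih R (postA links f L [])]
      simp [List.append_assoc]
    · rw [ih L arr]
      simp [List.append_assoc]
    · rw [ih R arr]
      simp [List.append_assoc]
    · simp

lemma PP_succ (links : List (List Int)) (f : Nat) (x : Int) :
    PP links (f + 1) x =
      (if 0 ≤ leftOf links x then PP links f (leftOf links x) else []) ++
      (if 0 ≤ rightOf links x then PP links f (rightOf links x) else []) ++ [x] := by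
  simp only [PP, postA, leftOf, rightOf]
  by_cases h1 : 0 ≤ PySem.List.pyGetD (PySem.List.pyGetD links x []) 0 0 <;>
  by_cases h2 : 0 ≤ PySem.List.pyGetD (PySem.List.pyGetD links x []) 1 0
  · simp only [h1, h2, if_true, if_false]
    rw [postA_acc links f _ (postA links f (PySem.List.pyGetD (PySem.List.pyGetD links x []) 0 0) [])]
    try simp [List.append_assoc]
  · simp [h1, h2]
  · simp [h1, h2]
  · simp [h1, h2]

lemma deep_mem_self {n : Nat} {links : List (List Int)} {f : Nat} {x : Int}
    (h : Deep n links f x) : x ∈ PP links f x := by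
  cases f with
  | zero => exact absurd h (by simp [Deep])
  | succ f => rw [PP_succ]; simp

lemma row_shape {n : Nat} {links : List (List Int)} (hlen : n ≤ links.length)
    (hrows : ∀ r ∈ links.take n, r.length = 2 ∧ ∀ e ∈ r, e < (n : Int))
    (x : Int) (hx0 : 0 ≤ x) (hxn : x < (n : Int)) :
    PySem.List.pyGetD links x [] = [leftOf links x, rightOf links x] ∧
    leftOf links x < (n : Int) ∧ rightOf links x < (n : Int) ∧
    PySem.List.pyGetD links x [] ∈ links.take n := by
  have hxlt : x.toNat < n := by omega
  have hxlen : x.toNat < links.length := lt_of_lt_of_le hxlt hlen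
  have hrow : PySem.List.pyGetD links x [] = links[x.toNat] :=
    PySem.List.pyGetD_eq_getElem links [] hx0 (by push_cast; omega)
  have htklen : x.toNat < (links.take n).length := by simp [List.length_take]; omega
  have htk : (links.take n)[x.toNat] = links[x.toNat] := List.getElem_take
  have hmem : links[x.toNat] ∈ links.take n := htk ▸ List.getElem_mem htklen
  obtain ⟨hlen2, hel⟩ := hrows _ hmem
  obtain ⟨a, b, hab⟩ := List.length_eq_two.mp hlen2
  have hL : leftOf links x = a := by
    unfold leftOf
    rw [hrow, hab, pyGetD_pair0]
  have hR : rightOf links x = b := by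
    unfold rightOf
    rw [hrow, hab, pyGetD_pair1]
  refine ⟨by rw [hrow, hab, hL, hR], ?_, ?_, by rw [hrow]; exact hmem⟩
  · rw [hL]; exact hel a (by simp [hab])
  · rw [hR]; exact hel b (by simp [hab])

lemma mem_kids {n : Nat} {links : List (List Int)} (hlen : n ≤ links.length)
    {c p : Int} (h : childOf links n c p) : c ∈ kidsOf links n := by
  obtain ⟨hp0, hpn, hc0, hcm⟩ := h
  have hplt : p.toNat < n := by omega
  have hplen : p.toNat < links.length := lt_of_lt_of_le hplt hlen
  have hrow : PySem.List.pyGetD links p [] = links[p.toNat] :=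
    PySem.List.pyGetD_eq_getElem links [] hp0 (by push_cast; omega)
  have htklen : p.toNat < (links.take n).length := by simp [List.length_take]; omega
  have htk : (links.take n)[p.toNat] = links[p.toNat] := List.getElem_take
  have hmem : links[p.toNat] ∈ links.take n := htk ▸ List.getElem_mem htklen
  simp only [kidsOf, List.mem_filter, List.mem_flatMap]
  exact ⟨⟨links[p.toNat], hmem, by rwa [hrow] at hcm⟩, by simpa using hc0⟩

lemma nodup_flat_no_two {T : List (List Int)}
    (hnd : ((T.flatMap (fun r => r)).filter (fun e => decide (0 ≤ e))).Nodup)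
    {c : Int} (hc : 0 ≤ c) {i j : Nat} (hij : i < j) (hj : j < T.length)
    (hci : c ∈ T[i]'(Nat.lt_trans hij hj)) (hcj : c ∈ T[j]) : False := by
  have hsplit : T = T.take j ++ T[j] :: T.drop (j + 1) := by
    conv_lhs => rw [← List.take_append_drop j T]
    rw [List.drop_eq_getElem_cons hj]
  rw [hsplit, List.flatMap_append, List.flatMap_cons, List.filter_append, List.filter_append] at hnd
  have hdisj := List.disjoint_of_nodup_append hnd
  have hitk : c ∈ (T.take j).flatMap (fun r => r) := by
    refine List.mem_flatMap.mpr ⟨T[i]'(Nat.lt_trans hij hj), ?_, hci⟩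
    have hilen : i < (T.take j).length := by simp [List.length_take]; omega
    have : (T.take j)[i] = T[i]'(Nat.lt_trans hij hj) := List.getElem_take
    exact this ▸ List.getElem_mem hilen
  exact hdisj (List.mem_filter.mpr ⟨hitk, by simpa using hc⟩)
    (List.mem_append_left _ (List.mem_filter.mpr ⟨hcj, by simpa using hc⟩))

lemma childOf_unique {n : Nat} {links : List (List Int)} (hlen : n ≤ links.length)
    (hnd : (kidsOf links n).Nodup) {c p p' : Int}
    (h : childOf links n c p) (h' : childOf links n c p') : p = p' := by
  by_contra hne
  obtain ⟨hp0, hpn, hc0, hcm⟩ := h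
  obtain ⟨hp0', hpn', _, hcm'⟩ := h'
  have hrow : PySem.List.pyGetD links p [] = links[p.toNat]'(by omega) :=
    PySem.List.pyGetD_eq_getElem links [] hp0 (by push_cast; omega)
  have hrow' : PySem.List.pyGetD links p' [] = links[p'.toNat]'(by omega) :=
    PySem.List.pyGetD_eq_getElem links [] hp0' (by push_cast; omega)
  rw [hrow] at hcm; rw [hrow'] at hcm'
  have hTlen : n ≤ (links.take n).length := by simp [List.length_take]; omega
  have hgi : ∀ (i : Nat) (h : i < n), links[i]'(by omega) = (links.take n)[i]'(by omega) := by
    intro i hi; exact (List.getElem_take).symm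
  have hnd' : (((links.take n).flatMap (fun r => r)).filter (fun e => decide (0 ≤ e))).Nodup := hnd
  rcases Nat.lt_or_ge p.toNat p'.toNat with hlt | hge
  · exact nodup_flat_no_two hnd' hc0 hlt (by omega)
      (by rw [← hgi p.toNat (by omega)]; exact hcm) (by rw [← hgi p'.toNat (by omega)]; exact hcm')
  · have hlt : p'.toNat < p.toNat := by omega
    exact nodup_flat_no_two hnd' hc0 hlt (by omega)
      (by rw [← hgi p'.toNat (by omega)]; exact hcm') (by rw [← hgi p.toNat (by omega)]; exact hcm)

lemma row_children_ne {n : Nat} {links : List (List Int)} (hlen : n ≤ links.length)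
    (hrows : ∀ r ∈ links.take n, r.length = 2 ∧ ∀ e ∈ r, e < (n : Int))
    (hnd : (kidsOf links n).Nodup) {x : Int} (hx0 : 0 ≤ x) (hxn : x < (n : Int))
    (hl : 0 ≤ leftOf links x) (hr : 0 ≤ rightOf links x) :
    leftOf links x ≠ rightOf links x := by
  obtain ⟨hrow, _, _, hmem⟩ := row_shape hlen hrows x hx0 hxn
  have hsub : List.Sublist (PySem.List.pyGetD links x []) ((links.take n).flatMap (fun r => r)) := by
    have h1 := List.sublist_flatten_of_mem hmem
    have h2 : ((links.take n).flatMap (fun r => r)) = (links.take n).flatten := by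
      simp [List.flatMap_def]
    rw [h2]
    exact h1
  have hsubf := hsub.filter (fun e => decide (0 ≤ e))
  have hndrow := (hnd.sublist hsubf :
    ((PySem.List.pyGetD links x []).filter (fun e => decide (0 ≤ e))).Nodup)
  rw [hrow] at hndrow
  intro heq
  rw [heq] at hndrow
  simp [List.filter, hr] at hndrow

-- the tree lemma: inside Pre_, the DFS from a node whose ancestors are all
-- outside Free stays inside Free, is duplicate-free, and is depth-bounded
lemma treeLemma {n : Nat} {links : List (List Int)} (hlen : n ≤ links.length)
    (hrows : ∀ r ∈ links.take n, r.length = 2 ∧ ∀ e ∈ r, e < (n : Int))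
    (hnd : (kidsOf links n).Nodup) :
    ∀ (fuel : Nat) (x : Int) (Free : List Int),
      Free.Nodup → (∀ y ∈ Free, 0 ≤ y ∧ y < (n : Int)) → x ∈ Free →
      (x ∉ kidsOf links n ∨ ∃ p, childOf links n x p ∧ p ∉ Free) →
      (∀ y : Int, 0 ≤ y → y < (n : Int) → y ∉ Free →
        (y ∉ kidsOf links n ∨ ∃ p, childOf links n y p ∧ p ∉ Free)) →
      Free.length ≤ fuel →
      Deep n links fuel x ∧ (∀ y ∈ PP links fuel x, y ∈ Free) ∧ (PP links fuel x).Nodup ∧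
      (∀ y ∈ PP links fuel x, y = x ∨ ∃ p ∈ PP links fuel x, childOf links n y p) := by
  intro fuel
  induction fuel with
  | zero =>
    intro x Free hFnd hFb hxF hxp hinv hflen
    have h1 : 0 < Free.length := List.length_pos_of_mem hxF
    omega
  | succ fuel ih =>
    intro x Free hFnd hFb hxF hxp hinv hflen
    obtain ⟨hx0, hxn⟩ := hFb x hxF
    obtain ⟨hrow, hlL, hlR, hmemrow⟩ := row_shape hlen hrows x hx0 hxn
    -- children that exist lie in Free and differ from x
    have childIn : ∀ c : Int, 0 ≤ c → c ∈ PySem.List.pyGetD links x [] → c ∈ Free ∧ c ≠ x := by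
      intro c hc0 hcm
      have cchild : childOf links n c x := ⟨hx0, hxn, hc0, hcm⟩
      have hckid : c ∈ kidsOf links n := mem_kids hlen cchild
      have hcn : c < (n : Int) := by
        rw [hrow] at hcm
        have : c = leftOf links x ∨ c = rightOf links x := by simpa using hcm
        rcases this with h | h
        · rw [h]; exact hlL
        · rw [h]; exact hlR
      constructor
      · by_contra hcF
        rcases hinv c hc0 hcn hcF with hnk | ⟨p, hcp, hpF⟩
        · exact hnk hckid
        · exact hpF ((childOf_unique hlen hnd hcp cchild) ▸ hxF)
      · intro hcx
        subst hcx
        rcases hxp with hnk | ⟨p, hpp, hpF⟩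
        · exact hnk hckid
        · exact hpF ((childOf_unique hlen hnd hpp cchild) ▸ hxF)
    -- the free list with x removed
    set F1 : List Int := Free.erase x with hF1
    have hF1nd : F1.Nodup := hFnd.erase x
    have hF1sub : ∀ y ∈ F1, y ∈ Free := fun y hy => List.mem_of_mem_erase hy
    have hF1b : ∀ y ∈ F1, 0 ≤ y ∧ y < (n : Int) := fun y hy => hFb y (hF1sub y hy)
    have hxF1 : x ∉ F1 := hFnd.not_mem_erase
    have hF1mem : ∀ y : Int, y ∈ F1 ↔ y ≠ x ∧ y ∈ Free := fun y => hFnd.mem_erase_iff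
    have hF1len : F1.length ≤ fuel := by
      have h2 : F1.length = Free.length - 1 := by
        rw [hF1]; exact List.length_erase_of_mem hxF
      have h1 : 0 < Free.length := List.length_pos_of_mem hxF
      omega
    have hinv1 : ∀ y : Int, 0 ≤ y → y < (n : Int) → y ∉ F1 →
        (y ∉ kidsOf links n ∨ ∃ p, childOf links n y p ∧ p ∉ F1) := by
      intro y hy0 hyn hyF1
      by_cases hyx : y = x
      · subst hyx
        rcases hxp with hnk | ⟨p, hpp, hpF⟩
        · exact Or.inl hnk
        · exact Or.inr ⟨p, hpp, fun hp => hpF (hF1sub p hp)⟩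
      · have hyF : y ∉ Free := fun hyF => hyF1 ((hF1mem y).mpr ⟨hyx, hyF⟩)
        rcases hinv y hy0 hyn hyF with hnk | ⟨p, hpp, hpF⟩
        · exact Or.inl hnk
        · exact Or.inr ⟨p, hpp, fun hp => hpF (hF1sub p hp)⟩
    set L := leftOf links x with hLdef
    set R := rightOf links x with hRdef
    have hLmem : 0 ≤ L → L ∈ PySem.List.pyGetD links x [] := fun _ => by rw [hrow]; simp
    have hRmem : 0 ≤ R → R ∈ PySem.List.pyGetD links x [] := fun _ => by rw [hrow]; simp
    by_cases hL : 0 ≤ L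
    · -- left child exists
      have hLF := childIn L hL (hLmem hL)
      have hLF1 : L ∈ F1 := (hF1mem L).mpr ⟨hLF.2, hLF.1⟩
      have cL : childOf links n L x := ⟨hx0, hxn, hL, hLmem hL⟩
      obtain ⟨dL, sL, ndL, clL⟩ := ih L F1 hF1nd hF1b hLF1 (Or.inr ⟨x, cL, hxF1⟩) hinv1 hF1len
      by_cases hR : 0 ≤ R
      · -- both children
        have hRF := childIn R hR (hRmem hR)
        have cR : childOf links n R x := ⟨hx0, hxn, hR, hRmem hR⟩
        have hLR : L ≠ R := row_children_ne hlen hrows hnd hx0 hxn hL hR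
        set F2 : List Int := F1.filter (fun y => decide (y ∉ PP links fuel L)) with hF2
        have hF2nd : F2.Nodup := hF1nd.filter _
        have hF2sub : ∀ y ∈ F2, y ∈ F1 := fun y hy => (List.mem_filter.mp hy).1
        have hF2b : ∀ y ∈ F2, 0 ≤ y ∧ y < (n : Int) := fun y hy => hF1b y (hF2sub y hy)
        have hF2mem : ∀ y : Int, y ∈ F2 ↔ y ∈ F1 ∧ y ∉ PP links fuel L := by
          intro y; rw [hF2, List.mem_filter]; simp
        have hxF2 : x ∉ F2 := fun h => hxF1 (hF2sub x h)
        have hF2len : F2.length ≤ fuel := le_trans (List.length_filter_le _ _) hF1len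
        have hRPL : R ∉ PP links fuel L := by
          intro hRP
          rcases clL R hRP with heq | ⟨p, hpP, hpc⟩
          · exact hLR heq.symm
          · have : p = x := childOf_unique hlen hnd hpc cR
            exact hxF1 (this ▸ sL p hpP)
        have hRF2 : R ∈ F2 := (hF2mem R).mpr ⟨(hF1mem R).mpr ⟨hRF.2, hRF.1⟩, hRPL⟩
        have hinv2 : ∀ y : Int, 0 ≤ y → y < (n : Int) → y ∉ F2 →
            (y ∉ kidsOf links n ∨ ∃ p, childOf links n y p ∧ p ∉ F2) := by
          intro y hy0 hyn hyF2
          by_cases hyF1 : y ∈ F1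
          · have hyP : y ∈ PP links fuel L := by
              by_contra hyP
              exact hyF2 ((hF2mem y).mpr ⟨hyF1, hyP⟩)
            rcases clL y hyP with hyL | ⟨p, hpP, hpc⟩
            · subst hyL
              exact Or.inr ⟨x, cL, hxF2⟩
            · exact Or.inr ⟨p, hpc, fun hp => ((hF2mem p).mp hp).2 hpP⟩
          · rcases hinv1 y hy0 hyn hyF1 with hnk | ⟨p, hpp, hpF⟩
            · exact Or.inl hnk
            · exact Or.inr ⟨p, hpp, fun hp => hpF (hF2sub p hp)⟩
        obtain ⟨dR, sR, ndR, clR⟩ := ih R F2 hF2nd hF2b hRF2 (Or.inr ⟨x, cR, hxF2⟩) hinv2 hF2len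
        have hPP : PP links (fuel + 1) x =
            PP links fuel L ++ PP links fuel R ++ [x] := by
          rw [PP_succ]; rw [← hLdef, ← hRdef]; simp [hL, hR]
        refine ⟨?_, ?_, ?_, ?_⟩
        · show Deep n links (fuel + 1) x
          simp only [Deep, ← hLdef, ← hRdef]
          exact ⟨hx0, hxn, fun _ => dL, fun _ => dR⟩
        · intro y hy
          rw [hPP] at hy
          rcases List.mem_append.mp hy with hy | hy
          · rcases List.mem_append.mp hy with hy | hy
            · exact hF1sub y (sL y hy)
            · exact hF1sub y (hF2sub y (sR y hy))
          · simp at hy; subst hy; exact hxF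
        · rw [hPP]
          rw [List.nodup_append, List.nodup_append]
          refine ⟨⟨ndL, ndR, ?_⟩, List.nodup_singleton x, ?_⟩
          · intro a haL b hbR hab
            subst hab
            exact ((hF2mem a).mp (sR a hbR)).2 haL
          · intro a ha b hb hab
            have hax : a = x := by
              have hbx : b = x := by simpa using hb
              omega
            rw [hax] at ha
            rcases List.mem_append.mp ha with h | h
            · exact hxF1 (sL x h)
            · exact hxF2 (sR x h)
        · intro y hy
          rw [hPP] at hy
          rcases List.mem_append.mp hy with hy | hy
          · rcases List.mem_append.mp hy with hy | hy
            · rcases clL y hy with hyL | ⟨p, hpP, hpc⟩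
              · subst hyL
                exact Or.inr ⟨x, by rw [hPP]; exact List.mem_append_right _ (by simp), cL⟩
              · exact Or.inr ⟨p, by
                  rw [hPP]; exact List.mem_append_left _ (List.mem_append_left _ hpP), hpc⟩
            · rcases clR y hy with hyR | ⟨p, hpP, hpc⟩
              · subst hyR
                exact Or.inr ⟨x, by rw [hPP]; exact List.mem_append_right _ (by simp), cR⟩
              · exact Or.inr ⟨p, by
                  rw [hPP]; exact List.mem_append_left _ (List.mem_append_right _ hpP), hpc⟩
          · simp at hy; subst hy; exact Or.inl rfl
      · -- only the left child
        have hPP : PP links (fuel + 1) x = PP links fuel L ++ [x] := by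
          rw [PP_succ]; rw [← hLdef, ← hRdef]; simp [hL, hR]
        refine ⟨?_, ?_, ?_, ?_⟩
        · show Deep n links (fuel + 1) x
          simp only [Deep, ← hLdef, ← hRdef]
          exact ⟨hx0, hxn, fun _ => dL, fun h => absurd h hR⟩
        · intro y hy
          rw [hPP] at hy
          rcases List.mem_append.mp hy with hy | hy
          · exact hF1sub y (sL y hy)
          · simp at hy; subst hy; exact hxF
        · rw [hPP, List.nodup_append]
          refine ⟨ndL, List.nodup_singleton x, ?_⟩
          intro a haL b hb hab
          have hax : a = x := by
            have hbx : b = x := by simpa using hb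
            omega
          rw [hax] at haL
          exact hxF1 (sL x haL)
        · intro y hy
          rw [hPP] at hy
          rcases List.mem_append.mp hy with hy | hy
          · rcases clL y hy with hyL | ⟨p, hpP, hpc⟩
            · subst hyL
              exact Or.inr ⟨x, by rw [hPP]; exact List.mem_append_right _ (by simp), cL⟩
            · exact Or.inr ⟨p, by rw [hPP]; exact List.mem_append_left _ hpP, hpc⟩
          · simp at hy; subst hy; exact Or.inl rfl
    · by_cases hR : 0 ≤ R
      · -- only the right child
        have hRF := childIn R hR (hRmem hR)
        have hRF1 : R ∈ F1 := (hF1mem R).mpr ⟨hRF.2, hRF.1⟩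
        have cR : childOf links n R x := ⟨hx0, hxn, hR, hRmem hR⟩
        obtain ⟨dR, sR, ndR, clR⟩ := ih R F1 hF1nd hF1b hRF1 (Or.inr ⟨x, cR, hxF1⟩) hinv1 hF1len
        have hPP : PP links (fuel + 1) x = PP links fuel R ++ [x] := by
          rw [PP_succ]; rw [← hLdef, ← hRdef]; simp [hL, hR]
        refine ⟨?_, ?_, ?_, ?_⟩
        · show Deep n links (fuel + 1) x
          simp only [Deep, ← hLdef, ← hRdef]
          exact ⟨hx0, hxn, fun h => absurd h hL, fun _ => dR⟩
        · intro y hy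
          rw [hPP] at hy
          rcases List.mem_append.mp hy with hy | hy
          · exact hF1sub y (sR y hy)
          · simp at hy; subst hy; exact hxF
        · rw [hPP, List.nodup_append]
          refine ⟨ndR, List.nodup_singleton x, ?_⟩
          intro a haR b hb hab
          have hax : a = x := by
            have hbx : b = x := by simpa using hb
            omega
          rw [hax] at haR
          exact hxF1 (sR x haR)
        · intro y hy
          rw [hPP] at hy
          rcases List.mem_append.mp hy with hy | hy
          · rcases clR y hy with hyR | ⟨p, hpP, hpc⟩
            · subst hyR
              exact Or.inr ⟨x, by rw [hPP]; exact List.mem_append_right _ (by simp), cR⟩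
            · exact Or.inr ⟨p, by rw [hPP]; exact List.mem_append_left _ hpP, hpc⟩
          · simp at hy; subst hy; exact Or.inl rfl
      · -- a leaf
        have hPP : PP links (fuel + 1) x = [x] := by
          rw [PP_succ]; rw [← hLdef, ← hRdef]; simp [hL, hR]
        refine ⟨?_, ?_, ?_, ?_⟩
        · show Deep n links (fuel + 1) x
          simp only [Deep, ← hLdef, ← hRdef]
          exact ⟨hx0, hxn, fun h => absurd h hL, fun h => absurd h hR⟩
        · intro y hy
          rw [hPP] at hy; simp at hy; subst hy; exact hxF
        · rw [hPP]; exact List.nodup_singleton x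
        · intro y hy
          rw [hPP] at hy; simp at hy; subst hy; exact Or.inl rfl


lemma stepA_eq (num : List Int) (links : List (List Int))
    (hlen : num.length ≤ links.length)
    (hrows : ∀ r ∈ links.take num.length, r.length = 2 ∧ ∀ e ∈ r, e < (num.length : Int))
    (limit : Int) (fuel : Nat) (x : Int) (hx0 : 0 ≤ x) (hxn : x < (num.length : Int))
    (st : List Int × List Int)
    (hL : 0 ≤ leftOf links x →
      PySem.List.pyGetD st.1 (leftOf links x) 0 = (dfsB num links limit fuel (leftOf links x)).1 ∧
      PySem.List.pyGetD st.2 (leftOf links x) 0 = (dfsB num links limit fuel (leftOf links x)).2)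
    (hR : 0 ≤ rightOf links x →
      PySem.List.pyGetD st.1 (rightOf links x) 0 = (dfsB num links limit fuel (rightOf links x)).1 ∧
      PySem.List.pyGetD st.2 (rightOf links x) 0 = (dfsB num links limit fuel (rightOf links x)).2) :
    stepA num links limit st x =
      (PySem.List.pySetD st.1 x (dfsB num links limit (fuel + 1) x).1,
       PySem.List.pySetD st.2 x (dfsB num links limit (fuel + 1) x).2) := by
  obtain ⟨hrow, hlL, hlR, -⟩ := row_shape hlen hrows x hx0 hxn
  simp only [stepA, dfsB, hrow, pyGetD_pair0, pyGetD_pair1]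
  by_cases h1 : 0 ≤ leftOf links x <;> by_cases h2 : 0 ≤ rightOf links x
  · -- two children
    obtain ⟨hs1, hc1⟩ := hL h1
    obtain ⟨hs2, hc2⟩ := hR h2
    rw [if_neg (show ¬(leftOf links x < 0 ∧ rightOf links x < 0) from fun h => absurd h.1 (by omega))]
    have hxorf : (decide (0 ≤ leftOf links x) ^^ decide (0 ≤ rightOf links x)) = false := by
      simp [h1, h2]
    rw [hxorf]
    simp only [Bool.false_eq_true, if_false]
    rw [if_pos (And.intro h1 h2)]
    rw [if_neg (show ¬(leftOf links x < 0 ∧ rightOf links x < 0) from fun h => absurd h.1 (by omega))]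
    rw [if_neg (show ¬(leftOf links x < 0 ∨ rightOf links x < 0) from by omega)]
    rw [hs1, hc1, hs2, hc2]
    set p1 := dfsB num links limit fuel (leftOf links x) with hp1
    set p2 := dfsB num links limit fuel (rightOf links x) with hp2
    set a := PySem.List.pyGetD num x 0 with ha
    by_cases hsum : p1.1 + p2.1 + a ≤ limit
    · simp [hsum]
    · by_cases h3 : p1.1 + a ≤ limit <;> by_cases h4 : p2.1 + a ≤ limit
      · -- both pairable: the sort decides
        by_cases h5 : p2.1 + a < p1.1 + a <;>
          simp [hsum, h3, h4, h5, PySem.List.sorted, PySem.List.insertBy, Prod.mk.injEq] <;>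
          (first | rfl | omega | (congr 1 <;> omega))
      · simp [hsum, h3, h4, PySem.List.sorted, PySem.List.insertBy, Prod.mk.injEq] <;>
          (first | rfl | omega | (congr 1 <;> omega))
      · simp [hsum, h3, h4, PySem.List.sorted, PySem.List.insertBy, Prod.mk.injEq] <;>
          (first | rfl | omega | (congr 1 <;> omega))
      · simp [hsum, h3, h4, Prod.mk.injEq] <;>
          (first | rfl | omega | (congr 1 <;> omega))
  · -- only the left child
    obtain ⟨hs1, hc1⟩ := hL h1
    rw [if_neg (show ¬(leftOf links x < 0 ∧ rightOf links x < 0) from fun h => absurd h.1 (by omega))]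
    have hxort : (decide (0 ≤ leftOf links x) ^^ decide (0 ≤ rightOf links x)) = true := by
      simp [h1, h2]
    rw [hxort]
    simp only [if_true]
    rw [if_pos (show leftOf links x < 0 ∨ rightOf links x < 0 from by omega)]
    rw [if_pos h1]
    rw [hs1, hc1]
    by_cases hs : (dfsB num links limit fuel (leftOf links x)).1 + PySem.List.pyGetD num x 0 ≤ limit <;>
      simp [hs, not_lt.mpr h1]
  · -- only the right child
    obtain ⟨hs2, hc2⟩ := hR h2
    rw [if_neg (show ¬(leftOf links x < 0 ∧ rightOf links x < 0) from fun h => absurd h.2 (by omega))]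
    have hxort : (decide (0 ≤ leftOf links x) ^^ decide (0 ≤ rightOf links x)) = true := by
      simp [h1, h2]
    rw [hxort]
    simp only [if_true]
    rw [if_pos (show leftOf links x < 0 ∨ rightOf links x < 0 from by omega)]
    rw [if_neg h1]
    rw [hs2, hc2]
    by_cases hs : (dfsB num links limit fuel (rightOf links x)).1 + PySem.List.pyGetD num x 0 ≤ limit <;>
      simp [hs, not_lt.mpr h2]
  · -- a leaf
    rw [if_pos ⟨by omega, by omega⟩, if_pos ⟨by omega, by omega⟩]

lemma dpLemma (num : List Int) (links : List (List Int))
    (hlen : num.length ≤ links.length)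
    (hrows : ∀ r ∈ links.take num.length, r.length = 2 ∧ ∀ e ∈ r, e < (num.length : Int))
    (limit : Int) :
    ∀ (fuel : Nat) (x : Int) (sd cd : List Int),
      Deep num.length links fuel x → (PP links fuel x).Nodup →
      sd.length = num.length → cd.length = num.length →
      (((PP links fuel x).foldl (stepA num links limit) (sd, cd)).1.length = num.length ∧
       ((PP links fuel x).foldl (stepA num links limit) (sd, cd)).2.length = num.length) ∧
      (∀ y : Int, 0 ≤ y → y ∉ PP links fuel x →
        PySem.List.pyGetD ((PP links fuel x).foldl (stepA num links limit) (sd, cd)).1 y 0 =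
          PySem.List.pyGetD sd y 0 ∧
        PySem.List.pyGetD ((PP links fuel x).foldl (stepA num links limit) (sd, cd)).2 y 0 =
          PySem.List.pyGetD cd y 0) ∧
      PySem.List.pyGetD ((PP links fuel x).foldl (stepA num links limit) (sd, cd)).1 x 0 =
        (dfsB num links limit fuel x).1 ∧
      PySem.List.pyGetD ((PP links fuel x).foldl (stepA num links limit) (sd, cd)).2 x 0 =
        (dfsB num links limit fuel x).2 := by
  intro fuel
  induction fuel with
  | zero => intro x sd cd hdeep _ _ _; exact absurd hdeep (by simp [Deep])
  | succ fuel ih =>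
    intro x sd cd hdeep hnd hsl hcl
    have hdeep' := hdeep
    simp only [Deep] at hdeep'
    obtain ⟨hx0, hxn, hdl, hdr⟩ := hdeep'
    have hPPs := PP_succ links fuel x
    by_cases hL : 0 ≤ leftOf links x <;> by_cases hR : 0 ≤ rightOf links x
    · -- two children
      have hPP2 : PP links (fuel + 1) x =
          PP links fuel (leftOf links x) ++ PP links fuel (rightOf links x) ++ [x] := by
        rw [hPPs]; simp [hL, hR]
      rw [hPP2] at hnd ⊢
      rw [List.nodup_append, List.nodup_append] at hnd
      obtain ⟨⟨ndL, ndR, hdisjLR⟩, -, hdisjx⟩ := hnd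
      have hxPL : x ∉ PP links fuel (leftOf links x) :=
        fun h => hdisjx x (List.mem_append_left _ h) x (by simp) rfl
      have hxPR : x ∉ PP links fuel (rightOf links x) :=
        fun h => hdisjx x (List.mem_append_right _ h) x (by simp) rfl
      have hLPL : leftOf links x ∈ PP links fuel (leftOf links x) := deep_mem_self (hdl hL)
      have hRPR : rightOf links x ∈ PP links fuel (rightOf links x) := deep_mem_self (hdr hR)
      have hLPR : leftOf links x ∉ PP links fuel (rightOf links x) :=
        fun h => hdisjLR (leftOf links x) hLPL (leftOf links x) h rfl
      obtain ⟨⟨h1sl, h1cl⟩, hun1, hat1s, hat1c⟩ := ih (leftOf links x) sd cd (hdl hL) ndL hsl hcl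
      set st1 := (PP links fuel (leftOf links x)).foldl (stepA num links limit) (sd, cd) with hst1
      obtain ⟨⟨h2sl, h2cl⟩, hun2, hat2s, hat2c⟩ :=
        ih (rightOf links x) st1.1 st1.2 (hdr hR) ndR h1sl h1cl
      have heta : (st1.1, st1.2) = st1 := rfl
      rw [heta] at h2sl h2cl hun2 hat2s hat2c
      set st2 := (PP links fuel (rightOf links x)).foldl (stepA num links limit) st1 with hst2
      rw [List.foldl_append, List.foldl_append, List.foldl_cons, List.foldl_nil, ← hst1, ← hst2]
      have hstep := stepA_eq num links hlen hrows limit fuel x hx0 hxn st2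
        (fun h => ⟨by rw [(hun2 _ hL hLPR).1, hat1s], by rw [(hun2 _ hL hLPR).2, hat1c]⟩)
        (fun h => ⟨hat2s, hat2c⟩)
      rw [hstep]
      refine ⟨⟨by simp [PySem.List.length_pySetD, h2sl], by simp [PySem.List.length_pySetD, h2cl]⟩, ?_, ?_, ?_⟩
      · intro y hy0 hyP
        have hyPL : y ∉ PP links fuel (leftOf links x) :=
          fun h => hyP (List.mem_append_left _ (List.mem_append_left _ h))
        have hyPR : y ∉ PP links fuel (rightOf links x) :=
          fun h => hyP (List.mem_append_left _ (List.mem_append_right _ h))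
        have hyx : y ≠ x := fun h => hyP (by subst h; simp)
        constructor
        · rw [pyGetD_set_ne _ _ _ _ hx0 hy0 hyx, (hun2 y hy0 hyPR).1, (hun1 y hy0 hyPL).1]
        · rw [pyGetD_set_ne _ _ _ _ hx0 hy0 hyx, (hun2 y hy0 hyPR).2, (hun1 y hy0 hyPL).2]
      · rw [pyGetD_set_self _ _ _ hx0 (by rw [h2sl]; exact hxn)]
      · rw [pyGetD_set_self _ _ _ hx0 (by rw [h2cl]; exact hxn)]
    · -- only the left child
      have hPP2 : PP links (fuel + 1) x = PP links fuel (leftOf links x) ++ [x] := by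
        rw [hPPs]; simp [hL, hR]
      rw [hPP2] at hnd ⊢
      rw [List.nodup_append] at hnd
      obtain ⟨ndL, -, hdisjx⟩ := hnd
      have hxPL : x ∉ PP links fuel (leftOf links x) := fun h => hdisjx x h x (by simp) rfl
      obtain ⟨⟨h1sl, h1cl⟩, hun1, hat1s, hat1c⟩ := ih (leftOf links x) sd cd (hdl hL) ndL hsl hcl
      set st1 := (PP links fuel (leftOf links x)).foldl (stepA num links limit) (sd, cd) with hst1
      rw [List.foldl_append, List.foldl_cons, List.foldl_nil, ← hst1]
      have hstep := stepA_eq num links hlen hrows limit fuel x hx0 hxn st1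
        (fun h => ⟨hat1s, hat1c⟩) (fun h => absurd h hR)
      rw [hstep]
      refine ⟨⟨by simp [PySem.List.length_pySetD, h1sl], by simp [PySem.List.length_pySetD, h1cl]⟩, ?_, ?_, ?_⟩
      · intro y hy0 hyP
        have hyPL : y ∉ PP links fuel (leftOf links x) := fun h => hyP (List.mem_append_left _ h)
        have hyx : y ≠ x := fun h => hyP (by subst h; simp)
        constructor
        · rw [pyGetD_set_ne _ _ _ _ hx0 hy0 hyx, (hun1 y hy0 hyPL).1]
        · rw [pyGetD_set_ne _ _ _ _ hx0 hy0 hyx, (hun1 y hy0 hyPL).2]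
      · rw [pyGetD_set_self _ _ _ hx0 (by rw [h1sl]; exact hxn)]
      · rw [pyGetD_set_self _ _ _ hx0 (by rw [h1cl]; exact hxn)]
    · -- only the right child
      have hPP2 : PP links (fuel + 1) x = PP links fuel (rightOf links x) ++ [x] := by
        rw [hPPs]; simp [hL, hR]
      rw [hPP2] at hnd ⊢
      rw [List.nodup_append] at hnd
      obtain ⟨ndR, -, hdisjx⟩ := hnd
      have hxPR : x ∉ PP links fuel (rightOf links x) := fun h => hdisjx x h x (by simp) rfl
      obtain ⟨⟨h1sl, h1cl⟩, hun1, hat1s, hat1c⟩ := ih (rightOf links x) sd cd (hdr hR) ndR hsl hcl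
      set st1 := (PP links fuel (rightOf links x)).foldl (stepA num links limit) (sd, cd) with hst1
      rw [List.foldl_append, List.foldl_cons, List.foldl_nil, ← hst1]
      have hstep := stepA_eq num links hlen hrows limit fuel x hx0 hxn st1
        (fun h => absurd h hL) (fun h => ⟨hat1s, hat1c⟩)
      rw [hstep]
      refine ⟨⟨by simp [PySem.List.length_pySetD, h1sl], by simp [PySem.List.length_pySetD, h1cl]⟩, ?_, ?_, ?_⟩
      · intro y hy0 hyP
        have hyPR : y ∉ PP links fuel (rightOf links x) := fun h => hyP (List.mem_append_left _ h)
        have hyx : y ≠ x := fun h => hyP (by subst h; simp)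
        constructor
        · rw [pyGetD_set_ne _ _ _ _ hx0 hy0 hyx, (hun1 y hy0 hyPR).1]
        · rw [pyGetD_set_ne _ _ _ _ hx0 hy0 hyx, (hun1 y hy0 hyPR).2]
      · rw [pyGetD_set_self _ _ _ hx0 (by rw [h1sl]; exact hxn)]
      · rw [pyGetD_set_self _ _ _ hx0 (by rw [h1cl]; exact hxn)]
    · -- a leaf
      have hPP2 : PP links (fuel + 1) x = [x] := by rw [hPPs]; simp [hL, hR]
      rw [hPP2]
      rw [List.foldl_cons, List.foldl_nil]
      have hstep := stepA_eq num links hlen hrows limit fuel x hx0 hxn (sd, cd)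
        (fun h => absurd h hL) (fun h => absurd h hR)
      rw [hstep]
      refine ⟨⟨by simp [PySem.List.length_pySetD, hsl], by simp [PySem.List.length_pySetD, hcl]⟩, ?_, ?_, ?_⟩
      · intro y hy0 hyP
        have hyx : y ≠ x := by simpa using hyP
        exact ⟨pyGetD_set_ne _ _ _ _ hx0 hy0 hyx, pyGetD_set_ne _ _ _ _ hx0 hy0 hyx⟩
      · rw [pyGetD_set_self _ _ _ hx0 (by rw [(by simp : ((sd, cd) : List Int × List Int).1.length = sd.length), hsl]; exact hxn)]
      · rw [pyGetD_set_self _ _ _ hx0 (by rw [(by simp : ((sd, cd) : List Int × List Int).2.length = cd.length), hcl]; exact hxn)]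


lemma discard_fold (ds : List Int) : ∀ s : List Int,
    ds.foldl (fun s c => if c ≠ -1 then PySem.Set.discard s c else s) s =
      s.filter (fun y => decide (y ∉ ds.filter (fun c => decide (c ≠ -1)))) := by
  induction ds with
  | nil => intro s; simp
  | cons c ds ihd =>
    intro s
    simp only [List.foldl_cons]
    by_cases hc : c ≠ -1
    · rw [if_pos hc]
      have hdisc : PySem.Set.discard s c = s.filter (fun y => decide (y ≠ c)) := by
        simp only [PySem.Set.discard]
        apply List.filter_congr
        intro y _
        by_cases h : y = c <;> simp [h]
      rw [hdisc, ihd, List.filter_filter]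
      apply List.filter_congr
      intro y _
      by_cases hyc : y = c <;> simp [hyc, hc]
    · rw [if_neg hc, ihd]
      apply List.filter_congr
      intro y _
      simp at hc
      simp [hc]

lemma foldl_foldl_flatMap {α β : Type} (f : α → List β) {σ : Type} (g : σ → β → σ) :
    ∀ (l : List α) (s0 : σ),
      l.foldl (fun s i => (f i).foldl g s) s0 = (l.flatMap f).foldl g s0 := by
  intro l
  induction l with
  | nil => intro s0; simp
  | cons i l ihl => intro s0; simp [List.foldl_append, ihl]

lemma flat_rows (links : List (List Int)) :
    ∀ (n : Nat), n ≤ links.length →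
      (PySem.List.pyRange 0 (n : Int) 1).flatMap (fun i => PySem.List.pyGetD links i []) =
        (links.take n).flatMap (fun r => r) := by
  intro n
  induction n with
  | zero => intro h; simp [PySem.List.pyRange_one_eq_nil]
  | succ n ihn =>
    intro h
    have h1 : (0 : Int) ≤ (n : Int) := by omega
    have h2 : ((n : Nat) : Int) + 1 = ((n + 1 : Nat) : Int) := by push_cast; ring
    rw [← h2, PySem.List.pyRange_one_succ_right h1, List.flatMap_append, ihn (by omega)]
    have h3 : links.take (n + 1) = links.take n ++ [links[n]'(by omega)] := by
      rw [List.take_succ]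
      congr
      simp [List.getElem?_eq_getElem (by omega : n < links.length)]
    rw [h3, List.flatMap_append]
    congr 1
    have : PySem.List.pyGetD links (n : Int) [] = links[n]'(by omega) := by
      rw [PySem.List.pyGetD_eq_getElem links [] (by omega) (by push_cast; omega)]
      simp
    simp [this]

lemma hpChar (ds : List Int) : ∀ hp : List Bool, (∀ c ∈ ds, 0 ≤ c → c < (hp.length : Int)) →
    (ds.foldl (fun hp c => if 0 ≤ c then PySem.List.pySetD hp c true else hp) hp).length = hp.length ∧
    ∀ j : Nat, j < hp.length →
      ((ds.foldl (fun hp c => if 0 ≤ c then PySem.List.pySetD hp c true else hp) hp).getD j false =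
        (hp.getD j false || decide ((j : Int) ∈ ds.filter (fun c => decide (0 ≤ c))))) := by
  induction ds with
  | nil => intro hp _; simp
  | cons c ds ihd =>
    intro hp hbound
    simp only [List.foldl_cons]
    by_cases hc : 0 ≤ c
    · rw [if_pos hc, PySem.List.pySetD_of_nonneg hp true hc]
      have hclen : c.toNat < hp.length := by
        have := hbound c (by simp) hc
        omega
      obtain ⟨ihl, ihg⟩ := ihd (hp.set c.toNat true)
        (by intro d hd hd0; simp only [List.length_set]; exact hbound d (by simp [hd]) hd0)
      refine ⟨by rw [ihl]; simp, ?_⟩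
      intro j hj
      rw [ihg j (by simpa using hj)]
      have hsetD : (hp.set c.toNat true).getD j false =
          (if j = c.toNat then true else hp.getD j false) := by
        by_cases hjc : j = c.toNat
        · subst hjc
          simp [List.getD, List.getElem?_set_self, hclen, List.getElem?_eq_getElem hclen]
        · simp [List.getD, List.getElem?_set_ne (fun h => hjc h.symm), hjc]
      rw [hsetD]
      by_cases hjc : j = c.toNat
      · have hjc' : (j : Int) = c := by omega
        have hmem : ((j : Int) ∈ List.filter (fun c => decide (0 ≤ c)) (c :: ds)) :=
          List.mem_filter.mpr ⟨by simp [hjc'], by simp⟩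
        rw [if_pos hjc, decide_eq_true hmem]
        try simp
      · have hne : (j : Int) ≠ c := by omega
        rw [if_neg hjc]
        have hdec : decide ((j : Int) ∈ List.filter (fun c => decide (0 ≤ c)) (c :: ds)) =
            decide ((j : Int) ∈ List.filter (fun c => decide (0 ≤ c)) ds) :=
          decide_eq_decide.mpr (by
            rw [List.filter_cons, if_pos (by simpa using hc)]
            simp [hne])
        rw [hdec]
    · rw [if_neg hc]
      obtain ⟨ihl, ihg⟩ := ihd hp (fun d hd hd0 => hbound d (by simp [hd]) hd0)
      refine ⟨ihl, ?_⟩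
      intro j hj
      rw [ihg j hj]
      have hdec : decide ((j : Int) ∈ List.filter (fun c => decide (0 ≤ c)) (c :: ds)) =
          decide ((j : Int) ∈ List.filter (fun c => decide (0 ≤ c)) ds) := by
        rw [List.filter_cons, if_neg (by simpa using hc)]
      rw [hdec]

lemma findEq : ∀ (hp : List Bool) (a : Int) (q : Int → Bool),
    (∀ j : Nat, j < hp.length → hp.getD j false = q (a + j)) →
    ((PySem.List.pyRange a (a + hp.length) 1).filter (fun y => !q y)).headD 0 =
      (match List.idxOf? false hp with
       | some j => a + (j : Int)
       | none => 0) := by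
  intro hp
  induction hp with
  | nil => intro a q _; simp [PySem.List.pyRange_one_eq_nil, List.idxOf?]
  | cons b hp ihp =>
    intro a q hq
    have hb : b = q a := by
      have := hq 0 (by simp)
      simpa using this
    have hcons : PySem.List.pyRange a (a + ((b :: hp).length : Nat)) 1 =
        a :: PySem.List.pyRange (a + 1) ((a + 1) + (hp.length : Nat)) 1 := by
      rw [PySem.List.pyRange_one_cons (by simp)]
      congr 1
      push_cast [List.length_cons]
      ring
    rw [hcons, hb]
    cases hqa : q a with
    | false =>
      simp [List.filter_cons, hqa, List.idxOf?_cons]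
    | true =>
      have hrest := ihp (a + 1) q (by
        intro j hj
        have := hq (j + 1) (by simp; omega)
        simp only [List.getD] at this ⊢
        rw [show ((a : Int) + 1 + (j : Int)) = a + ((j : Int) + 1) by ring]
        simpa using this)
      simp only [List.filter_cons, hqa, Bool.not_true]
      simp only [Bool.false_eq_true, if_false]
      rw [hrest]
      rw [List.idxOf?_cons]
      simp only [show ((true == false) = true) = False by simp, if_false]
      cases h : List.idxOf? false hp with
      | none => simp
      | some j => simp; ring

lemma bsCongr (num : List Int) (links : List (List Int)) (root : Int) (arr : List Int) (k : Int)
    (h : ∀ m : Int, groupCntA num links root arr m = feasB num links root m) :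
    ∀ (n : Nat) (l r ans : Int), (r - l + 1).toNat ≤ n →
      bsearchA num links root arr k l r ans = bsearchB num links root k l r ans := by
  intro n
  induction n with
  | zero =>
    intro l r ans hn
    rw [bsearchA, bsearchB]
    have hlr : ¬ l ≤ r := by omega
    rw [dif_neg hlr, dif_neg hlr]
  | succ n ihn =>
    intro l r ans hn
    rw [bsearchA, bsearchB]
    by_cases hlr : l ≤ r
    · rw [dif_pos hlr, dif_pos hlr]
      have hm := PySem.Int.floordiv_two_mid_bounds hlr
      simp only [h]
      by_cases hgc : feasB num links root (PySem.Int.floordiv (l + r) 2) ≤ k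
      · rw [if_pos hgc, if_pos hgc]
        exact ihn _ _ _ (by omega)
      · rw [if_neg hgc, if_neg hgc]
        exact ihn _ _ _ (by omega)
    · rw [dif_neg hlr, dif_neg hlr]


lemma rootA (num : List Int) (links : List (List Int)) (hlen : num.length ≤ links.length) :
    ((PySem.List.pyRange 0 (num.length : Int) 1).foldl
      (fun s i => (PySem.List.pyGetD links i []).foldl
        (fun s c => if c ≠ -1 then PySem.Set.discard s c else s) s)
      (PySem.Set.ofList (PySem.List.pyRange 0 (num.length : Int) 1))).headD 0 =
    ((PySem.List.pyRange 0 (num.length : Int) 1).filter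
      (fun y => decide (y ∉ kidsOf links num.length))).headD 0 := by
  rw [PySem.Set.ofList_eq_self_of_nodup _ (PySem.List.nodup_pyRange_one 0 _)]
  rw [foldl_foldl_flatMap (fun i => PySem.List.pyGetD links i [])]
  rw [flat_rows links num.length hlen]
  rw [discard_fold]
  congr 1
  apply List.filter_congr
  intro y hy
  have hy0 : 0 ≤ y := (PySem.List.mem_pyRange_one.mp hy).1
  simp only [decide_eq_decide, kidsOf, List.mem_filter, decide_eq_true_eq]
  constructor
  · intro h hmem
    exact h ⟨hmem.1, by omega⟩
  · intro h hmem
    exact h ⟨hmem.1, by omega⟩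

lemma rootB (num : List Int) (links : List (List Int)) (hlen : num.length ≤ links.length)
    (hrows : ∀ r ∈ links.take num.length, r.length = 2 ∧ ∀ e ∈ r, e < (num.length : Int)) :
    ((((PySem.List.index? ((links.take num.length).foldl
        (fun hp row => row.foldl
          (fun hp c => if 0 ≤ c then PySem.List.pySetD hp c true else hp) hp)
        (List.replicate num.length false)) false).getD 0 : Nat) : Int)) =
    ((PySem.List.pyRange 0 (num.length : Int) 1).filter
      (fun y => decide (y ∉ kidsOf links num.length))).headD 0 := by
  rw [foldl_foldl_flatMap (fun r => r)]
  have hbound : ∀ c ∈ (links.take num.length).flatMap (fun r => r), 0 ≤ c →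
      c < ((List.replicate num.length (false : Bool)).length : Int) := by
    intro c hc hc0
    rw [List.length_replicate]
    obtain ⟨r, hr, hcr⟩ := List.mem_flatMap.mp hc
    exact (hrows r hr).2 c hcr
  obtain ⟨hlen2, hchar⟩ := hpChar ((links.take num.length).flatMap (fun r => r))
    (List.replicate num.length false) hbound
  have hreslen : (((links.take num.length).flatMap (fun r => r)).foldl
      (fun hp c => if 0 ≤ c then PySem.List.pySetD hp c true else hp)
      (List.replicate num.length false)).length = num.length := by
    rw [hlen2, List.length_replicate]
  have hq : ∀ j : Nat, j < (((links.take num.length).flatMap (fun r => r)).foldl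
      (fun hp c => if 0 ≤ c then PySem.List.pySetD hp c true else hp)
      (List.replicate num.length false)).length →
      (((links.take num.length).flatMap (fun r => r)).foldl
      (fun hp c => if 0 ≤ c then PySem.List.pySetD hp c true else hp)
      (List.replicate num.length false)).getD j false =
      (fun y => decide (y ∈ kidsOf links num.length)) ((0 : Int) + j) := by
    intro j hj
    rw [hreslen] at hj
    rw [hchar j (by simpa using hj)]
    have hrep : (List.replicate num.length (false : Bool)).getD j false = false := by
      simp [List.getD]
    rw [hrep]
    simp only [Bool.false_or, kidsOf]
    rw [zero_add]
    try rfl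
  have hfe := findEq _ 0 (fun y => decide (y ∈ kidsOf links num.length)) hq
  rw [hreslen] at hfe
  have hfilt : (PySem.List.pyRange 0 (0 + (num.length : Int)) 1).filter
      (fun y => !(fun y => decide (y ∈ kidsOf links num.length)) y) =
      (PySem.List.pyRange 0 (num.length : Int) 1).filter
      (fun y => decide (y ∉ kidsOf links num.length)) := by
    rw [show (0 : Int) + (num.length : Int) = (num.length : Int) by ring]
    apply List.filter_congr
    intro y _
    simp
  rw [hfilt] at hfe
  rw [hfe]
  simp only [PySem.List.index?]
  cases h : List.idxOf? false (((links.take num.length).flatMap (fun r => r)).foldl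
      (fun hp c => if 0 ≤ c then PySem.List.pySetD hp c true else hp)
      (List.replicate num.length false)) with
  | none => simp
  | some j => simp

lemma rootProps (num : List Int) (links : List (List Int))
    (hp5 : (PySem.List.pyRange 0 (num.length : Int) 1).filter
      (fun y => decide (y ∉ kidsOf links num.length)) ≠ []) :
    0 ≤ ((PySem.List.pyRange 0 (num.length : Int) 1).filter
        (fun y => decide (y ∉ kidsOf links num.length))).headD 0 ∧
    ((PySem.List.pyRange 0 (num.length : Int) 1).filter
        (fun y => decide (y ∉ kidsOf links num.length))).headD 0 < (num.length : Int) ∧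
    ((PySem.List.pyRange 0 (num.length : Int) 1).filter
        (fun y => decide (y ∉ kidsOf links num.length))).headD 0 ∉ kidsOf links num.length := by
  cases h : (PySem.List.pyRange 0 (num.length : Int) 1).filter
      (fun y => decide (y ∉ kidsOf links num.length)) with
  | nil => exact absurd h hp5
  | cons z rest =>
    have hz : z ∈ (PySem.List.pyRange 0 (num.length : Int) 1).filter
        (fun y => decide (y ∉ kidsOf links num.length)) := by rw [h]; simp
    obtain ⟨hzr, hzk⟩ := List.mem_filter.mp hz
    obtain ⟨hz0, hzN⟩ := PySem.List.mem_pyRange_one.mp hzr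
    simp only [List.headD_cons]
    exact ⟨hz0, hzN, by simpa using hzk⟩

lemma gcEq (num : List Int) (links : List (List Int)) (hlen : num.length ≤ links.length)
    (hrows : ∀ r ∈ links.take num.length, r.length = 2 ∧ ∀ e ∈ r, e < (num.length : Int))
    (root : Int) (hdeep : Deep num.length links num.length root)
    (hnd : (PP links num.length root).Nodup) (limit : Int) :
    groupCntA num links root (postA links num.length root []) limit = feasB num links root limit := by
  obtain ⟨-, -, -, hatc⟩ := dpLemma num links hlen hrows limit num.length root
    (List.replicate num.length 0) (List.replicate num.length 0) hdeep hnd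
    (by simp) (by simp)
  simp only [groupCntA, feasB]
  simp only [PP] at hatc
  rw [hatc]

-- ===== VERDICT (by name: the statement is the Claim_ definition above) =====
theorem solution_spec : Claim_equal_solution := by
  intro k num links hdom hpre
  obtain ⟨hp1, hp2, hp3, hp4, hp5⟩ := hpre
  show solution k num links = solution_alt k num links
  unfold solution solution_alt
  have hA := rootA num links hp2
  have hB := rootB num links hp2 hp3
  dsimp only
  rw [hA, hB]
  obtain ⟨hr0, hrN, hrk⟩ := rootProps num links hp5
  set rv := ((PySem.List.pyRange 0 (num.length : Int) 1).filter
    (fun y => decide (y ∉ kidsOf links num.length))).headD 0 with hrv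
  have htree := treeLemma hp2 hp3 hp4 num.length rv
    (PySem.List.pyRange 0 (num.length : Int) 1)
    (PySem.List.nodup_pyRange_one 0 _)
    (fun y hy => PySem.List.mem_pyRange_one.mp hy)
    (PySem.List.mem_pyRange_one.mpr ⟨hr0, hrN⟩)
    (Or.inl hrk)
    (fun y hy0 hyN hyF => absurd (PySem.List.mem_pyRange_one.mpr ⟨hy0, hyN⟩) hyF)
    (by rw [PySem.List.length_pyRange_one]; omega)
  obtain ⟨hdeep, -, hndP, -⟩ := htree
  exact bsCongr num links rv (postA links num.length rv []) k
    (gcEq num links hp2 hp3 rv hdeep hndP) _ _ _ _ le_rfl
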